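-- pv_equiv track=rewrite | github.com/Chocon2911/Tic-Tac-Toe_Statistic-Method | generate_v1_1.py | is_terminal_reachable
-- ===== SOURCE A (Python) =====
-- from typing import List, Tuple, Iterable, Set
--
-- def has_winner(board: List[int], player: int, win_lines: List[Tuple[int,...]]) -> bool:
--     return any(all(board[i] == player for i in line) for line in win_lines)
--
-- def winners(board: List[int], win_lines: List[Tuple[int,...]]) -> Set[int]:
--     s = set()
--     if has_winner(board, 1, win_lines): s.add(1)
--     if has_winner(board, 2, win_lines): s.add(2)
--     return s
--
-- def count_pieces(board: List[int]) -> Tuple[int, int]: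
--     x = sum(1 for v in board if v == 1)
--     o = sum(1 for v in board if v == 2)
--     return x, o
--
-- def is_terminal_reachable(board: List[int], winner: int, win_lines: List[Tuple[int,...]]) -> bool:
--     """
--     Exactly one winner. There exists a last-move on a winning line such that
--     removing it yields a legal previous position: correct counts, no winner, turn rule holds.
--     """
--     if winner not in (1,2): return False
--     if winners(board, win_lines) != {winner}: return False
--
--     x, o = count_pieces(board)
--     total = x + o
--
--     if winner == 1:
--         if total % 2 != 1 or x != o + 1: return False
--         prev_x, prev_o = x - 1, o
--     else:
--         if total % 2 != 0 or x != o: return False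
--         prev_x, prev_o = x, o - 1
--
--     for line in win_lines:
--         if all(board[i] == winner for i in line):
--             for i in line:
--                 if board[i] != winner:
--                     continue
--                 prev = board.copy()
--                 prev[i] = 0
--                 if count_pieces(prev) != (prev_x, prev_o):
--                     continue
--                 if winners(prev, win_lines):
--                     continue
--                 if not (prev_x == prev_o or prev_x == prev_o + 1):
--                     continue
--                 return True
--     return False
-- ===== SOURCE B (Python) =====
-- def is_terminal_reachable(board, winner, win_lines):
--     if winner not in (1, 2):
--         return False
--     loser = 3 - winner
--     # the loser must have no completed line, and the winner at least one
--     if any(all(board[i] == loser for i in line) for line in win_lines):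
--         return False
--     winning = [set(line) for line in win_lines if all(board[i] == winner for i in line)]
--     if not winning:
--         return False
--     # piece counts must show the winner just moved (parity is implied)
--     x = sum(1 for v in board if v == 1)
--     o = sum(1 for v in board if v == 2)
--     if x - o != (1 if winner == 1 else 0):
--         return False
--     # a legal predecessor exists iff one cell lies on every completed line
--     return len(set.intersection(*winning)) > 0
-- ===== Notes on version B (the rewrite author's own statement) =====
-- stated objective: simpler
-- what changed: Instead of A's nested loop that materialises a predecessor board for every cell of every winning line and re-runs the winner/count checks on each copy, B just intersects the winning lines as index sets: a legal predecessor exists iff one cell lies on every completed line; the redundant parity checks are dropped. …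
-- outside the precondition, e.g. on is_terminal_reachable([1, 1, 1, 2, 2, 0], 1, [(0, 1, 2), (-6, -5, -4)]): A returns True, B returns False; on is_terminal_reachable([0], 1, [(0, 5)]): A returns False, B returns False
import Mathlib
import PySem

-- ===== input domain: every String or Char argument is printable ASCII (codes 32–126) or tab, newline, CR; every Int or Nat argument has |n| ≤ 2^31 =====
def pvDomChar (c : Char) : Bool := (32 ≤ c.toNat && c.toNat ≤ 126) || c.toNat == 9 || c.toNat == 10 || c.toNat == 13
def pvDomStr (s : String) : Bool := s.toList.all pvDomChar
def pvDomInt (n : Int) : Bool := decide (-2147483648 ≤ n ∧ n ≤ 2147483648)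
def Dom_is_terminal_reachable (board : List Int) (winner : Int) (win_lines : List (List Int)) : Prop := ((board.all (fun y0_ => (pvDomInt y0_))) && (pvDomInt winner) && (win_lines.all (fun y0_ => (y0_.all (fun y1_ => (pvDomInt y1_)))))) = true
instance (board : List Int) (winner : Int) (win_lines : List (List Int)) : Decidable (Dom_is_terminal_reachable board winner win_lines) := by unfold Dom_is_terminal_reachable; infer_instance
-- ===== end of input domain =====

-- B replaces A's predecessor-board enumeration by one intersection of the winning lines as
-- index sets (simpler); equivalence is proved on boards whose win_lines indices are in range.

-- ===== PORT A =====
def pvHasWinner (board : List Int) (player : Int) (win_lines : List (List Int)) : Bool :=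
  win_lines.any (fun line => line.all (fun i => PySem.List.pyGetD board i 0 == player))

def pvWinners (board : List Int) (win_lines : List (List Int)) : PySem.Set Int :=
  let s : PySem.Set Int := PySem.Set.empty
  let s := if pvHasWinner board 1 win_lines then PySem.Set.add s 1 else s
  if pvHasWinner board 2 win_lines then PySem.Set.add s 2 else s

def pvCountPieces (board : List Int) : Int × Int :=
  (board.foldl (fun acc v => if v == 1 then acc + 1 else acc) 0,
   board.foldl (fun acc v => if v == 2 then acc + 1 else acc) 0)

-- the `for line in win_lines: … for i in line: … return True` tail of A
def pvScan (board : List Int) (winner : Int) (px po : Int) (win_lines : List (List Int)) : Bool :=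
  win_lines.any (fun line =>
    if line.all (fun i => PySem.List.pyGetD board i 0 == winner) then
      line.any (fun i =>
        if PySem.List.pyGetD board i 0 != winner then false
        else
          let prev := PySem.List.pySetD board i 0
          if pvCountPieces prev != (px, po) then false
          else if !(pvWinners prev win_lines).isEmpty then false
          else if !(px == po || px == po + 1) then false
          else true)
    else false)

def is_terminal_reachable (board : List Int) (winner : Int) (win_lines : List (List Int)) : Bool :=
  if !(winner == 1 || winner == 2) then false
  else if !(PySem.Set.equal (pvWinners board win_lines) (PySem.Set.ofList [winner])) then false
  else
    let x := (pvCountPieces board).1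
    let o := (pvCountPieces board).2
    let total := x + o
    if winner == 1 then
      if PySem.Int.mod total 2 != 1 || x != o + 1 then false
      else pvScan board winner (x - 1) o win_lines
    else
      if PySem.Int.mod total 2 != 0 || x != o then false
      else pvScan board winner x (o - 1) win_lines

-- ===== PORT B =====
def is_terminal_reachable_alt (board : List Int) (winner : Int) (win_lines : List (List Int)) : Bool :=
  if !(winner == 1 || winner == 2) then false
  else
    let loser := 3 - winner
    if win_lines.any (fun line => line.all (fun i => PySem.List.pyGetD board i 0 == loser)) then false
    else
      match win_lines.filter (fun line => line.all (fun i => PySem.List.pyGetD board i 0 == winner)) with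
      | [] => false
      | w0 :: rest =>
        let x : Int := board.countP (fun v => v == 1)
        let o : Int := board.countP (fun v => v == 2)
        if x - o != (if winner == 1 then (1 : Int) else 0) then false
        else
          let common := rest.foldl
            (fun c line => PySem.Set.inter c (PySem.Set.ofList line)) (PySem.Set.ofList w0)
          decide (0 < common.length)

-- ===== PRECONDITION & SPEC =====
-- Pre_ excludes inputs where, with winner 1 or 2, some win_lines index is negative or out of
-- board range: out of range, Python A raises IndexError or returns early depending only on
-- short-circuit order; negative in-range indices rely on Python's wraparound, a corner where
-- A's wrapped reading and B's literal index sets are both defensible.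
def Pre_is_terminal_reachable (board : List Int) (winner : Int) (win_lines : List (List Int)) : Prop :=
  (winner = 1 ∨ winner = 2) → ∀ line ∈ win_lines, ∀ i ∈ line, 0 ≤ i ∧ i < (board.length : Int)
instance (board : List Int) (winner : Int) (win_lines : List (List Int)) : Decidable (Pre_is_terminal_reachable board winner win_lines) := by unfold Pre_is_terminal_reachable; infer_instance

def pvWitness_is_terminal_reachable : List Int × Int × List (List Int) :=
  ([1, 1, 1, 2, 2, 0, 0, 0, 0], 1, [[0, 1, 2], [3, 4, 5], [6, 7, 8]])

def Spec_is_terminal_reachable (board : List Int) (winner : Int) (win_lines : List (List Int)) (out : Bool) : Prop := out = is_terminal_reachable_alt board winner win_lines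
instance (board : List Int) (winner : Int) (win_lines : List (List Int)) (out : Bool) : Decidable (Spec_is_terminal_reachable board winner win_lines out) := by unfold Spec_is_terminal_reachable; infer_instance

-- ===== CLAIM (what is proved, stated in full; the proofs are below) =====
def Claim_equal_is_terminal_reachable : Prop := ∀ (board : List Int) (winner : Int) (win_lines : List (List Int)), Dom_is_terminal_reachable board winner win_lines → Pre_is_terminal_reachable board winner win_lines → Spec_is_terminal_reachable board winner win_lines (is_terminal_reachable board winner win_lines)

-- ===== LEMMAS AND PROOFS =====
lemma pv_mod_eq (i : Int) (n : Nat) (h1 : -(n:Int) ≤ i) (h2 : i < (n:Int)) :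
    PySem.Int.mod i (n:Int) = if i < 0 then i + n else i := by
  have hn : 0 < (n:Int) := by omega
  rw [PySem.Int.mod_eq_emod_of_pos hn]
  by_cases h : i < 0
  · have h3 : (i + (n:Int)*1) % (n:Int) = i % (n:Int) := Int.add_mul_emod_self_left i (n:Int) 1
    rw [if_pos h, ← h3, mul_one, Int.emod_eq_of_lt (by omega) (by omega)]
  · rw [if_neg h, Int.emod_eq_of_lt (by omega) h2]

lemma pv_getD (xs : List Int) (i : Int) (h1 : -(xs.length:Int) ≤ i) (h2 : i < (xs.length:Int)) :
    PySem.List.pyGetD xs i 0 = xs.getD (PySem.Int.mod i (xs.length:Int)).toNat 0 := by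
  rw [pv_mod_eq i xs.length h1 h2]
  by_cases h : 0 ≤ i
  · rw [PySem.List.pyGetD_eq_getElem xs 0 h h2, if_neg (by omega)]
    rw [List.getD_eq_getElem _ _ (by omega)]
  · have hi : i = -(((-i).toNat : Nat) : Int) := by omega
    rw [hi, PySem.List.pyGetD_neg_natCast xs (-i).toNat 0 (by omega) (by omega),
      if_pos (by omega), List.getD_eq_getElem _ _ (by omega)]
    congr 1
    omega

lemma pv_setD (xs : List Int) (i : Int) (v : Int) (h1 : -(xs.length:Int) ≤ i) (h2 : i < (xs.length:Int)) :
    PySem.List.pySetD xs i v = xs.set (PySem.Int.mod i (xs.length:Int)).toNat v := by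
  rw [pv_mod_eq i xs.length h1 h2]
  by_cases h : 0 ≤ i
  · rw [PySem.List.pySetD_of_nonneg xs v h, if_neg (by omega)]
  · rw [if_pos (by omega)]
    simp only [PySem.List.pySetD, PySem.List.pySet?, PySem.List.pyIdx?, if_neg h, if_pos h1]
    simp only [Option.map_some, Option.getD_some]
    congr 1
    omega

lemma pv_count_set (xs : List Int) (k : Nat) (hk : k < xs.length) (v w : Int) :
    ((xs.set k v).count w : Int) + (if xs[k] = w then 1 else 0)
      = (xs.count w : Int) + (if v = w then 1 else 0) := by
  have hc1 : xs[k] = w → 1 ≤ xs.count w := fun h => by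
    rw [← h]; exact List.count_pos_iff.mpr (List.getElem_mem hk)
  rw [List.count_set hk]
  simp only [beq_iff_eq]
  split_ifs with h1 h2 h2
  · have := hc1 h1; omega
  · have := hc1 h1; omega
  · omega
  · omega

lemma pv_mem_foldl_inter (rest : List (List Int)) (g : List Int → PySem.Set Int)
    (s0 : PySem.Set Int) (c : Int) :
    c ∈ rest.foldl (fun s l => PySem.Set.inter s (g l)) s0 ↔ c ∈ s0 ∧ ∀ l ∈ rest, c ∈ g l := by
  induction rest generalizing s0 with
  | nil => simp
  | cons l rest ih =>
      simp only [List.foldl_cons, ih, PySem.Set.mem_inter, List.mem_cons]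
      constructor
      · rintro ⟨⟨h1, h2⟩, h3⟩
        exact ⟨h1, by rintro l' (rfl | hl'); exacts [h2, h3 l' hl']⟩
      · rintro ⟨h1, h2⟩
        exact ⟨⟨h1, h2 l (Or.inl rfl)⟩, fun l' hl' => h2 l' (Or.inr hl')⟩

lemma pv_getD_set (xs : List Int) (i j v : Int)
    (hi1 : -(xs.length:Int) ≤ i) (hi2 : i < (xs.length:Int))
    (hj1 : -(xs.length:Int) ≤ j) (hj2 : j < (xs.length:Int)) :
    PySem.List.pyGetD (xs.set (PySem.Int.mod i (xs.length:Int)).toNat v) j 0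
      = if PySem.Int.mod j (xs.length:Int) = PySem.Int.mod i (xs.length:Int) then v
        else PySem.List.pyGetD xs j 0 := by
  have hn : 0 < (xs.length:Int) := by omega
  have hki : (PySem.Int.mod i (xs.length:Int)).toNat < xs.length := by
    have := PySem.Int.mod_lt i hn; have := PySem.Int.mod_nonneg i hn; omega
  have hkj : (PySem.Int.mod j (xs.length:Int)).toNat < xs.length := by
    have := PySem.Int.mod_lt j hn; have := PySem.Int.mod_nonneg j hn; omega
  have hlen : (xs.set (PySem.Int.mod i (xs.length:Int)).toNat v).length = xs.length :=
    List.length_set ..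
  have h1 : PySem.List.pyGetD (xs.set (PySem.Int.mod i (xs.length:Int)).toNat v) j 0
      = (xs.set (PySem.Int.mod i (xs.length:Int)).toNat v).getD (PySem.Int.mod j (xs.length:Int)).toNat 0 := by
    have h := pv_getD (xs.set (PySem.Int.mod i (xs.length:Int)).toNat v) j
      (by rw [hlen]; omega) (by rw [hlen]; omega)
    rwa [hlen] at h
  rw [h1, pv_getD xs j hj1 hj2]
  rw [List.getD_eq_getElem _ _ (by rw [List.length_set]; exact hkj), List.getD_eq_getElem _ _ hkj]
  rw [List.getElem_set]
  have hmi := PySem.Int.mod_nonneg i hn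
  have hmj := PySem.Int.mod_nonneg j hn
  split_ifs with ha hb hb
  · rfl
  · exact absurd (by omega) hb
  · exact absurd (by omega : (PySem.Int.mod i (xs.length:Int)).toNat = (PySem.Int.mod j (xs.length:Int)).toNat) ha
  · rfl


def pvGood (board : List Int) (winner : Int) (win_lines : List (List Int)) (c : Int) : Prop :=
  ∀ L ∈ win_lines, (∀ j ∈ L, PySem.List.pyGetD board j 0 = winner) →
    ∃ j ∈ L, PySem.Int.mod j (board.length:Int) = c

lemma pv_winners_isEmpty (b : List Int) (wl : List (List Int)) :
    (pvWinners b wl).isEmpty = (!pvHasWinner b 1 wl && !pvHasWinner b 2 wl) := by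
  cases h1 : pvHasWinner b 1 wl <;> cases h2 : pvHasWinner b 2 wl <;>
    simp [pvWinners, h1, h2, PySem.Set.add, PySem.Set.empty]

lemma pv_countPieces_eq (b : List Int) :
    pvCountPieces b = ((b.count 1 : Int), (b.count 2 : Int)) := by
  unfold pvCountPieces
  rw [PySem.List.foldl_beq_add_one, PySem.List.foldl_beq_add_one]
  norm_num

lemma pv_chain (board : List Int) (winner : Int) (win_lines : List (List Int)) (px po : Int)
    (hw : winner = 1 ∨ winner = 2)
    (hin : ∀ L ∈ win_lines, ∀ j ∈ L, -(board.length:Int) ≤ j ∧ j < (board.length:Int))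
    (hO : pvHasWinner board (3 - winner) win_lines = false)
    (hpp : px = po ∨ px = po + 1)
    (hpcount : ∀ k, (hk : k < board.length) → board[k] = winner →
        pvCountPieces (board.set k 0) = (px, po))
    (L : List Int) (hL : L ∈ win_lines) (hWL : ∀ j ∈ L, PySem.List.pyGetD board j 0 = winner)
    (i : Int) (hi : i ∈ L) :
    ((if PySem.List.pyGetD board i 0 != winner then false
      else if pvCountPieces (PySem.List.pySetD board i 0) != (px, po) then false
      else if !(pvWinners (PySem.List.pySetD board i 0) win_lines).isEmpty then false
      else if !(px == po || px == po + 1) then false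
      else true) = true)
      ↔ pvGood board winner win_lines (PySem.Int.mod i (board.length:Int)) := by
  have hn : 0 < (board.length:Int) := by have := hin L hL i hi; omega
  have hi1 : -(board.length:Int) ≤ i := (hin L hL i hi).1
  have hi2 : i < (board.length:Int) := (hin L hL i hi).2
  have hbi : PySem.List.pyGetD board i 0 = winner := hWL i hi
  have hki : (PySem.Int.mod i (board.length:Int)).toNat < board.length := by
    have := PySem.Int.mod_lt i hn; have := PySem.Int.mod_nonneg i hn; omega
  have hset : PySem.List.pySetD board i 0
      = board.set (PySem.Int.mod i (board.length:Int)).toNat 0 := pv_setD board i 0 hi1 hi2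
  have hgki : board[(PySem.Int.mod i (board.length:Int)).toNat] = winner := by
    rw [pv_getD board i hi1 hi2, List.getD_eq_getElem _ _ hki] at hbi
    exact hbi
  -- condition 1 is false
  rw [show (PySem.List.pyGetD board i 0 != winner) = false by simp [hbi]]
  simp only [Bool.false_eq_true, if_false]
  -- count check passes
  rw [hset, show (pvCountPieces (board.set (PySem.Int.mod i (board.length:Int)).toNat 0)
      != (px, po)) = false by simp [hpcount _ hki hgki]]
  simp only [Bool.false_eq_true, if_false]
  -- turn check passes
  rw [show (!(px == po || px == po + 1)) = false by
    rcases hpp with h | h <;> simp [h]]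
  simp only [Bool.not_false, Bool.false_eq_true, if_false]
  -- remaining: winners of prev empty iff Good
  rw [pv_winners_isEmpty]
  -- prev lookups
  have hprev : ∀ j : Int, -(board.length:Int) ≤ j → j < (board.length:Int) →
      PySem.List.pyGetD (board.set (PySem.Int.mod i (board.length:Int)).toNat 0) j 0
        = if PySem.Int.mod j (board.length:Int) = PySem.Int.mod i (board.length:Int) then 0
          else PySem.List.pyGetD board j 0 :=
    fun j hj1 hj2 => pv_getD_set board i j 0 hi1 hi2 hj1 hj2
  -- no line of the loser in prev
  have hOprev : pvHasWinner (board.set (PySem.Int.mod i (board.length:Int)).toNat 0)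
      (3 - winner) win_lines = false := by
    simp only [pvHasWinner, List.any_eq_false] at hO ⊢
    intro L' hL'
    have h := hO L' hL'
    simp only [List.all_eq_true, beq_iff_eq] at h ⊢
    push_neg at h ⊢
    obtain ⟨j, hj, hjne⟩ := h
    refine ⟨j, hj, ?_⟩
    rw [hprev j (hin L' hL' j hj).1 (hin L' hL' j hj).2]
    split_ifs with hsp
    · rcases hw with rfl | rfl <;> norm_num
    · exact hjne
  -- a line of the winner survives iff it avoids the removed cell
  have hWprev : pvHasWinner (board.set (PySem.Int.mod i (board.length:Int)).toNat 0)
      winner win_lines = false ↔ pvGood board winner win_lines (PySem.Int.mod i (board.length:Int)) := by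
    have hw0 : winner ≠ 0 := by rcases hw with rfl | rfl <;> norm_num
    simp only [pvHasWinner, List.any_eq_false, List.all_eq_true, beq_iff_eq, pvGood]
    constructor
    · intro h L' hL' hWL'
      by_contra hno
      push_neg at hno
      apply h L' hL'
      intro j hj
      rw [hprev j (hin L' hL' j hj).1 (hin L' hL' j hj).2, if_neg (hno j hj)]
      exact hWL' j hj
    · intro h L' hL' hall
      have hWL' : ∀ j ∈ L', PySem.List.pyGetD board j 0 = winner := by
        intro j hj
        have hx := hall j hj
        rw [hprev j (hin L' hL' j hj).1 (hin L' hL' j hj).2] at hx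
        split_ifs at hx with hs
        · exact absurd hx.symm hw0
        · exact hx
      obtain ⟨j, hj, hmod⟩ := h L' hL' hWL'
      have hx := hall j hj
      rw [hprev j (hin L' hL' j hj).1 (hin L' hL' j hj).2, if_pos hmod] at hx
      exact absurd hx.symm hw0
  have hredge : ∀ c : Bool, ((if (!c) then false else true) = true ↔ c = true) := by decide
  rw [hredge]
  rcases hw with rfl | rfl
  · rw [show (3:Int) - 1 = 2 by norm_num] at hOprev
    simp [hOprev, hWprev.symm]
  · rw [show (3:Int) - 2 = 1 by norm_num] at hOprev
    simp [hOprev, hWprev.symm]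

lemma pv_scan_iff (board : List Int) (winner : Int) (win_lines : List (List Int)) (px po : Int)
    (hw : winner = 1 ∨ winner = 2)
    (hin : ∀ L ∈ win_lines, ∀ j ∈ L, -(board.length:Int) ≤ j ∧ j < (board.length:Int))
    (hO : pvHasWinner board (3 - winner) win_lines = false)
    (hpp : px = po ∨ px = po + 1)
    (hpcount : ∀ k, (hk : k < board.length) → board[k] = winner →
        pvCountPieces (board.set k 0) = (px, po))
    (hWn : pvHasWinner board winner win_lines = true) :
    (pvScan board winner px po win_lines = true) ↔ ∃ c, pvGood board winner win_lines c := by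
  simp only [pvScan, List.any_eq_true]
  constructor
  · rintro ⟨L, hL, hLcond⟩
    cases hall : (L.all fun i => PySem.List.pyGetD board i 0 == winner) with
    | false => rw [hall] at hLcond; simp only [Bool.false_eq_true, if_false] at hLcond
    | true =>
      rw [hall] at hLcond
      simp only [eq_self_iff_true, if_true] at hLcond
      have hWL : ∀ j ∈ L, PySem.List.pyGetD board j 0 = winner := by
        simpa [List.all_eq_true, beq_iff_eq] using hall
      obtain ⟨i, hi, hchain⟩ := List.any_eq_true.mp hLcond
      exact ⟨_, (pv_chain board winner win_lines px po hw hin hO hpp hpcount L hL hWL i hi).mp hchain⟩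
  · rintro ⟨c, hGood⟩
    obtain ⟨L, hL, hall⟩ := List.any_eq_true.mp hWn
    have hWL : ∀ j ∈ L, PySem.List.pyGetD board j 0 = winner := by
      simpa [List.all_eq_true, beq_iff_eq] using hall
    obtain ⟨i, hi, hmodi⟩ := hGood L hL hWL
    refine ⟨L, hL, ?_⟩
    rw [if_pos hall]
    refine List.any_eq_true.mpr ⟨i, hi, ?_⟩
    exact (pv_chain board winner win_lines px po hw hin hO hpp hpcount L hL hWL i hi).mpr
      (by rwa [hmodi])

lemma pv_common_iff (board : List Int) (winner : Int) (win_lines : List (List Int))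
    (w0 : List Int) (rest : List (List Int))
    (hfil : win_lines.filter (fun L => L.all (fun i => PySem.List.pyGetD board i 0 == winner))
        = w0 :: rest) :
    (0 < (rest.foldl (fun c line => PySem.Set.inter c
          (PySem.Set.ofList (line.map (fun i => PySem.Int.mod i (board.length:Int)))))
        (PySem.Set.ofList (w0.map (fun i => PySem.Int.mod i (board.length:Int))))).length)
      ↔ ∃ c, pvGood board winner win_lines c := by
  have hmem : ∀ L, (L ∈ win_lines ∧ (∀ j ∈ L, PySem.List.pyGetD board j 0 = winner))
      ↔ L ∈ w0 :: rest := by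
    intro L
    rw [← hfil, List.mem_filter]
    simp [List.all_eq_true, beq_iff_eq]
  rw [List.length_pos_iff_exists_mem]
  constructor
  · rintro ⟨c, hc⟩
    rw [pv_mem_foldl_inter] at hc
    obtain ⟨hc0, hcr⟩ := hc
    refine ⟨c, ?_⟩
    intro L hL hWL
    have hLm := (hmem L).mp ⟨hL, hWL⟩
    have hcin : c ∈ PySem.Set.ofList (L.map (fun i => PySem.Int.mod i (board.length:Int))) := by
      rcases List.mem_cons.mp hLm with rfl | hLr
      · exact hc0
      · exact hcr L hLr
    rw [PySem.Set.mem_ofList] at hcin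
    obtain ⟨j, hj, hjc⟩ := List.mem_map.mp hcin
    exact ⟨j, hj, hjc⟩
  · rintro ⟨c, hGood⟩
    have hget : ∀ L ∈ w0 :: rest,
        c ∈ PySem.Set.ofList (L.map (fun i => PySem.Int.mod i (board.length:Int))) := by
      intro L hL
      obtain ⟨hLw, hWL⟩ := (hmem L).mpr hL
      obtain ⟨j, hj, hjc⟩ := hGood L hLw hWL
      rw [PySem.Set.mem_ofList]
      exact List.mem_map.mpr ⟨j, hj, hjc⟩
    refine ⟨c, ?_⟩
    rw [pv_mem_foldl_inter]
    exact ⟨hget w0 (List.mem_cons_self), fun L hL => hget L (List.mem_cons.mpr (Or.inr hL))⟩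

lemma pv_foldl_ofList_map (f : Int → Int) (rest : List (List Int)) (s : PySem.Set Int)
    (h : ∀ L ∈ rest, L.map f = L) :
    rest.foldl (fun c l => PySem.Set.inter c (PySem.Set.ofList (l.map f))) s
      = rest.foldl (fun c l => PySem.Set.inter c (PySem.Set.ofList l)) s := by
  induction rest generalizing s with
  | nil => rfl
  | cons l rest ih =>
      rw [List.foldl_cons, List.foldl_cons, h l (List.mem_cons_self),
        ih _ (fun L hL => h L (List.mem_cons_of_mem _ hL))]

-- ===== VERDICT (by name: the statement is the Claim_ definition above) =====
theorem is_terminal_reachable_spec : Claim_equal_is_terminal_reachable := by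
  intro board winner win_lines hdom hpre
  unfold Spec_is_terminal_reachable
  by_cases hw : winner = 1 ∨ winner = 2
  case neg =>
    push_neg at hw
    have h1 : (winner == 1 || winner == 2) = false := by simp [hw.1, hw.2]
    simp [is_terminal_reachable, is_terminal_reachable_alt, h1]
  case pos =>
  have hnn : ∀ L ∈ win_lines, ∀ j ∈ L, 0 ≤ j ∧ j < (board.length:Int) := hpre hw
  have hin : ∀ L ∈ win_lines, ∀ j ∈ L, -(board.length:Int) ≤ j ∧ j < (board.length:Int) := by
    intro L hL j hj
    have := hnn L hL j hj
    exact ⟨by omega, this.2⟩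
  have hid : ∀ L ∈ win_lines, L.map (fun i => PySem.Int.mod i (board.length:Int)) = L := by
    intro L hL
    rw [show L.map (fun i => PySem.Int.mod i (board.length:Int)) = L.map id from
      List.map_congr_left (fun j hj => by
        have h := hnn L hL j hj
        rw [pv_mod_eq j board.length (by omega) h.2, if_neg (by omega)]
        rfl), List.map_id]
  rcases hw with rfl | rfl
  · -- winner = 1
    cases hWn : pvHasWinner board 1 win_lines <;> cases hO : pvHasWinner board 2 win_lines
    · -- no winner at all: A's set-equality guard fails, B's winning list is empty
      have hEq : PySem.Set.equal (pvWinners board win_lines) (PySem.Set.ofList [(1:Int)]) = false := by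
        simp [pvWinners, hWn, hO]; try decide
      have hfil : win_lines.filter
          (fun L => L.all (fun i => PySem.List.pyGetD board i 0 == (1:Int))) = [] := by
        rw [List.filter_eq_nil_iff]
        simp only [pvHasWinner, List.any_eq_false] at hWn
        exact fun L hL => by simp [hWn L hL]
      simp [is_terminal_reachable, is_terminal_reachable_alt, hEq, hfil,
        show ((3:Int) - 1) = 2 from by norm_num, pvHasWinner] at hO ⊢
      try simp [hO]
    · -- only the loser has a line
      have hEq : PySem.Set.equal (pvWinners board win_lines) (PySem.Set.ofList [(1:Int)]) = false := by
        simp [pvWinners, hWn, hO]; try decide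
      have hO' : (win_lines.any fun line =>
          line.all fun i => PySem.List.pyGetD board i 0 == (2:Int)) = true := hO
      simp [is_terminal_reachable, is_terminal_reachable_alt, hEq,
        show ((3:Int) - 1) = 2 from by norm_num, hO']
    · -- main case: winner 1 has a line, 2 does not
      have hEq : PySem.Set.equal (pvWinners board win_lines) (PySem.Set.ofList [(1:Int)]) = true := by
        simp [pvWinners, hWn, hO]; try decide
      have hO' : (win_lines.any fun line =>
          line.all fun i => PySem.List.pyGetD board i 0 == (2:Int)) = false := hO
      have hfilne : win_lines.filter
          (fun L => L.all (fun i => PySem.List.pyGetD board i 0 == (1:Int))) ≠ [] := by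
        obtain ⟨L, hL, hall⟩ := List.any_eq_true.mp hWn
        intro h
        have := List.filter_eq_nil_iff.mp h L hL
        simp [hall] at this
      obtain ⟨w0, rest, hfil⟩ := List.exists_cons_of_ne_nil hfilne
      have hAv : is_terminal_reachable board 1 win_lines
          = (if PySem.Int.mod ((board.count 1 : Int) + (board.count 2 : Int)) 2 != 1
                || ((board.count 1 : Int)) != (board.count 2 : Int) + 1 then false
             else pvScan board 1 ((board.count 1 : Int) - 1) (board.count 2 : Int) win_lines) := by
        simp [is_terminal_reachable, hEq, pv_countPieces_eq]
      have hBv : is_terminal_reachable_alt board 1 win_lines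
          = (if ((board.count 1 : Int)) - (board.count 2 : Int) != 1 then false
             else decide (0 < (rest.foldl (fun c line => PySem.Set.inter c
                  (PySem.Set.ofList line)) (PySem.Set.ofList w0)).length)) := by
        have hcnt1 : board.countP (fun v => v == (1:Int)) = board.count 1 := rfl
        have hcnt2 : board.countP (fun v => v == (2:Int)) = board.count 2 := rfl
        simp only [is_terminal_reachable_alt, show ((3:Int) - 1) = 2 from by norm_num, hO',
          Bool.false_eq_true, if_false, hfil, hcnt1, hcnt2]
        norm_num
      rw [hAv, hBv]
      by_cases hc : ((board.count 1 : Int)) = (board.count 2 : Int) + 1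
      · have hm : (PySem.Int.mod ((board.count 1 : Int) + (board.count 2 : Int)) 2 != 1) = false := by
          rw [PySem.Int.mod_eq_emod_of_pos (by norm_num)]
          simp only [bne_eq_false_iff_eq]
          omega
        rw [hm, show (((board.count 1 : Int)) != (board.count 2 : Int) + 1) = false from by
            simpa using hc,
          show (((board.count 1 : Int)) - (board.count 2 : Int) != 1) = false from by
            simp only [bne_eq_false_iff_eq]; omega]
        simp only [Bool.or_self, Bool.false_eq_true, if_false]
        have hO2 : pvHasWinner board (3 - 1) win_lines = false := by
          rw [show ((3:Int) - 1) = 2 from by norm_num]; exact hO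
        have hpp : ((board.count 1 : Int)) - 1 = (board.count 2 : Int) ∨
            ((board.count 1 : Int)) - 1 = (board.count 2 : Int) + 1 := Or.inl (by omega)
        have hpcount : ∀ k, (hk : k < board.length) → board[k] = 1 →
            pvCountPieces (board.set k 0) = (((board.count 1 : Int)) - 1, (board.count 2 : Int)) := by
          intro k hk hbk
          have c1 := pv_count_set board k hk 0 1
          have c2 := pv_count_set board k hk 0 2
          simp [hbk] at c1 c2
          rw [pv_countPieces_eq]
          simp only [Prod.mk.injEq]
          exact ⟨by omega, by omega⟩
        have h1 := pv_scan_iff board 1 win_lines ((board.count 1 : Int) - 1) (board.count 2 : Int)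
          (Or.inl rfl) hin hO2 hpp hpcount hWn
        have h2 := pv_common_iff board 1 win_lines w0 rest hfil
        have hmemfil : ∀ L ∈ w0 :: rest, L ∈ win_lines := by
          intro L hL
          rw [← hfil] at hL
          exact List.mem_of_mem_filter hL
        rw [hid w0 (hmemfil w0 List.mem_cons_self),
          pv_foldl_ofList_map _ rest _
            (fun L hL => hid L (hmemfil L (List.mem_cons_of_mem _ hL)))] at h2
        have hbool : ∀ p q : Bool, ((p = true) ↔ (q = true)) → p = q := by decide
        apply hbool
        rw [h1, decide_eq_true_iff]
        exact h2.symm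
      · rw [show (((board.count 1 : Int)) != (board.count 2 : Int) + 1) = true from by
            simpa using hc,
          show (((board.count 1 : Int)) - (board.count 2 : Int) != 1) = true from by
            simp only [bne_iff_ne]; omega]
        simp
    · -- both players have a line
      have hEq : PySem.Set.equal (pvWinners board win_lines) (PySem.Set.ofList [(1:Int)]) = false := by
        simp [pvWinners, hWn, hO]; try decide
      have hO' : (win_lines.any fun line =>
          line.all fun i => PySem.List.pyGetD board i 0 == (2:Int)) = true := hO
      simp [is_terminal_reachable, is_terminal_reachable_alt, hEq,
        show ((3:Int) - 1) = 2 from by norm_num, hO']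
  · -- winner = 2
    cases hO : pvHasWinner board 1 win_lines <;> cases hWn : pvHasWinner board 2 win_lines
    · -- no winner at all
      have hEq : PySem.Set.equal (pvWinners board win_lines) (PySem.Set.ofList [(2:Int)]) = false := by
        simp [pvWinners, hWn, hO]; try decide
      have hfil : win_lines.filter
          (fun L => L.all (fun i => PySem.List.pyGetD board i 0 == (2:Int))) = [] := by
        rw [List.filter_eq_nil_iff]
        simp only [pvHasWinner, List.any_eq_false] at hWn
        exact fun L hL => by simp [hWn L hL]
      simp [is_terminal_reachable, is_terminal_reachable_alt, hEq, hfil,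
        show ((3:Int) - 2) = 1 from by norm_num, pvHasWinner] at hO ⊢
      try simp [hO]
    · -- main case: winner 2 has a line, 1 does not
      have hEq : PySem.Set.equal (pvWinners board win_lines) (PySem.Set.ofList [(2:Int)]) = true := by
        simp [pvWinners, hWn, hO]; try decide
      have hO' : (win_lines.any fun line =>
          line.all fun i => PySem.List.pyGetD board i 0 == (1:Int)) = false := hO
      have hfilne : win_lines.filter
          (fun L => L.all (fun i => PySem.List.pyGetD board i 0 == (2:Int))) ≠ [] := by
        obtain ⟨L, hL, hall⟩ := List.any_eq_true.mp hWn
        intro h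
        have := List.filter_eq_nil_iff.mp h L hL
        simp [hall] at this
      obtain ⟨w0, rest, hfil⟩ := List.exists_cons_of_ne_nil hfilne
      have hAv : is_terminal_reachable board 2 win_lines
          = (if PySem.Int.mod ((board.count 1 : Int) + (board.count 2 : Int)) 2 != 0
                || ((board.count 1 : Int)) != (board.count 2 : Int) then false
             else pvScan board 2 ((board.count 1 : Int)) ((board.count 2 : Int) - 1) win_lines) := by
        simp [is_terminal_reachable, hEq, pv_countPieces_eq]
      have hBv : is_terminal_reachable_alt board 2 win_lines
          = (if ((board.count 1 : Int)) - (board.count 2 : Int) != 0 then false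
             else decide (0 < (rest.foldl (fun c line => PySem.Set.inter c
                  (PySem.Set.ofList line)) (PySem.Set.ofList w0)).length)) := by
        have hcnt1 : board.countP (fun v => v == (1:Int)) = board.count 1 := rfl
        have hcnt2 : board.countP (fun v => v == (2:Int)) = board.count 2 := rfl
        simp only [is_terminal_reachable_alt, show ((3:Int) - 2) = 1 from by norm_num, hO',
          Bool.false_eq_true, if_false, hfil, hcnt1, hcnt2]
        norm_num
      rw [hAv, hBv]
      by_cases hc : ((board.count 1 : Int)) = (board.count 2 : Int)
      · have hm : (PySem.Int.mod ((board.count 1 : Int) + (board.count 2 : Int)) 2 != 0) = false := by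
          rw [PySem.Int.mod_eq_emod_of_pos (by norm_num)]
          simp only [bne_eq_false_iff_eq]
          omega
        rw [hm, show (((board.count 1 : Int)) != (board.count 2 : Int)) = false from by
            simpa using hc,
          show (((board.count 1 : Int)) - (board.count 2 : Int) != 0) = false from by
            simp only [bne_eq_false_iff_eq]; omega]
        simp only [Bool.or_self, Bool.false_eq_true, if_false]
        have hO2 : pvHasWinner board (3 - 2) win_lines = false := by
          rw [show ((3:Int) - 2) = 1 from by norm_num]; exact hO
        have hpp : ((board.count 1 : Int)) = ((board.count 2 : Int) - 1) ∨
            ((board.count 1 : Int)) = ((board.count 2 : Int) - 1) + 1 := Or.inr (by omega)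
        have hpcount : ∀ k, (hk : k < board.length) → board[k] = 2 →
            pvCountPieces (board.set k 0) = (((board.count 1 : Int)), (board.count 2 : Int) - 1) := by
          intro k hk hbk
          have c1 := pv_count_set board k hk 0 1
          have c2 := pv_count_set board k hk 0 2
          simp [hbk] at c1 c2
          rw [pv_countPieces_eq]
          simp only [Prod.mk.injEq]
          exact ⟨by omega, by omega⟩
        have h1 := pv_scan_iff board 2 win_lines ((board.count 1 : Int)) ((board.count 2 : Int) - 1)
          (Or.inr rfl) hin hO2 hpp hpcount hWn
        have h2 := pv_common_iff board 2 win_lines w0 rest hfil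
        have hmemfil : ∀ L ∈ w0 :: rest, L ∈ win_lines := by
          intro L hL
          rw [← hfil] at hL
          exact List.mem_of_mem_filter hL
        rw [hid w0 (hmemfil w0 List.mem_cons_self),
          pv_foldl_ofList_map _ rest _
            (fun L hL => hid L (hmemfil L (List.mem_cons_of_mem _ hL)))] at h2
        have hbool : ∀ p q : Bool, ((p = true) ↔ (q = true)) → p = q := by decide
        apply hbool
        rw [h1, decide_eq_true_iff]
        exact h2.symm
      · rw [show (((board.count 1 : Int)) != (board.count 2 : Int)) = true from by
            simpa using hc,
          show (((board.count 1 : Int)) - (board.count 2 : Int) != 0) = true from by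
            simp only [bne_iff_ne]; omega]
        simp
    · -- only the loser has a line
      have hEq : PySem.Set.equal (pvWinners board win_lines) (PySem.Set.ofList [(2:Int)]) = false := by
        simp [pvWinners, hWn, hO]; try decide
      have hO' : (win_lines.any fun line =>
          line.all fun i => PySem.List.pyGetD board i 0 == (1:Int)) = true := hO
      simp [is_terminal_reachable, is_terminal_reachable_alt, hEq,
        show ((3:Int) - 2) = 1 from by norm_num, hO']
    · -- both players have a line
      have hEq : PySem.Set.equal (pvWinners board win_lines) (PySem.Set.ofList [(2:Int)]) = false := by
        simp [pvWinners, hWn, hO]; try decide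
      have hO' : (win_lines.any fun line =>
          line.all fun i => PySem.List.pyGetD board i 0 == (1:Int)) = true := hO
      simp [is_terminal_reachable, is_terminal_reachable_alt, hEq,
        show ((3:Int) - 2) = 1 from by norm_num, hO']
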